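-- pv_equiv track=rewrite | github.com/fahadshuvo33/gitscope-bot | utils/git_api.py | validate_repo_name
-- ===== SOURCE A (Python) =====
-- def validate_repo_name(repo: str) -> bool:
--     """Validate repository name format"""
--     if not repo or not isinstance(repo, str):
--         return False
--
--     repo = repo.strip()
--     if '/' not in repo:
--         return False
--
--     parts = repo.split('/')
--     if len(parts) != 2:
--         return False
--
--     owner, name = parts
--
--     if not owner or not name:
--         return False
--
--     # Check for invalid characters
--     invalid_chars = ['<', '>', '"', '|', '*', '?', ':', '\\']
--     if any(char in repo for char in invalid_chars):
--         return False
--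
--     # Check length constraints
--     if len(owner) > 39 or len(name) > 100:
--         return False
--
--     return True
-- ===== SOURCE B (Python) =====
-- def validate_repo_name(repo: str) -> bool:
--     """Validate repository name format via a one-pass state machine:
--     one fold over the characters tracking the slash count and the length
--     of the segment on each side; no split, no slicing, no staged scans."""
--     if not repo or not isinstance(repo, str):
--         return False
--
--     slashes = 0
--     lens = [0, 0]
--     for c in repo.strip():
--         if c in '<>"|*?:\\':
--             return False
--         if c == '/':
--             slashes += 1
--             if slashes > 1:
--                 return False
--         else:
--             lens[slashes] += 1
--
--     return slashes == 1 and 1 <= lens[0] <= 39 and 1 <= lens[1] <= 100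
-- ===== Notes on version B (the rewrite author's own statement) =====
-- stated objective: alternative
-- what changed: Replaces A's staged split-into-parts / unpack / per-invalid-char substring-scan cascade with a single-pass finite-state machine: one fold over the characters maintaining a slash counter and the two segment lengths, with all checks folded into the final state test.
import Mathlib
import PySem

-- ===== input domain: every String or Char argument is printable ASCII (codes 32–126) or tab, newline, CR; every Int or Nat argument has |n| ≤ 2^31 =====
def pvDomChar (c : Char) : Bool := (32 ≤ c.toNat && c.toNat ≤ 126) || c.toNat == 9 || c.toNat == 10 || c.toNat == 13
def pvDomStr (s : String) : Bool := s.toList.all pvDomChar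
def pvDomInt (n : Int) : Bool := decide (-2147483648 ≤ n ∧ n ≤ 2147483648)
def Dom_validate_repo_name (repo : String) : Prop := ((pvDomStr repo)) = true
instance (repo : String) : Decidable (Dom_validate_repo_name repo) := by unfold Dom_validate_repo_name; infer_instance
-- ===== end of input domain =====

-- B replaces A's split/unpack/per-invalid-char substring-scan cascade by a single-pass state
-- machine over the characters (slash counter + two length accumulators); objective: alternative.

-- ===== PORT A =====
-- A's logic after the empty-string guard, on the stripped character list.
def validate_repo_name_core (r : List Char) : Bool :=
  if ¬ PySem.Chars.isIn ['/'] r then false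
  else
    match PySem.Chars.splitOn r ['/'] with
    | [owner, name] =>
      if owner = [] ∨ name = [] then false
      else if ['<', '>', '"', '|', '*', '?', ':', '\\'].any
                (fun ch => PySem.Chars.isIn [ch] r) then false
      else if owner.length > 39 ∨ name.length > 100 then false
      else true
    | _ => false   -- len(parts) != 2

def validate_repo_name (repo : String) : Bool :=
  if repo.toList = [] then false   -- 'not repo' on a str
  else validate_repo_name_core (PySem.Chars.strip repo.toList)

-- ===== PORT B =====
-- B's invalid-character set ('<>"|*?:\' in Python)
def invList : List Char := ['<', '>', '"', '|', '*', '?', ':', '\\']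

-- B's loop: one pass with state (slashes, lens0, lens1); Python's early `return False` becomes
-- the recursion returning false.
def vrnLoop : List Char → Nat → Nat → Nat → Bool
  | [], slashes, l0, l1 =>
      decide (slashes = 1 ∧ 1 ≤ l0 ∧ l0 ≤ 39 ∧ 1 ≤ l1 ∧ l1 ≤ 100)
  | c :: rest, slashes, l0, l1 =>
      if invList.contains c then false
      else if c = '/' then
        if slashes + 1 > 1 then false else vrnLoop rest (slashes + 1) l0 l1
      else if slashes = 0 then vrnLoop rest slashes (l0 + 1) l1
      else vrnLoop rest slashes l0 (l1 + 1)

def validate_repo_name_alt (repo : String) : Bool :=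
  if repo.toList = [] then false
  else vrnLoop (PySem.Chars.strip repo.toList) 0 0 0

-- ===== PRECONDITION & SPEC =====
def Spec_validate_repo_name (repo : String) (out : Bool) : Prop := out = validate_repo_name_alt repo
instance (repo : String) (out : Bool) : Decidable (Spec_validate_repo_name repo out) := by unfold Spec_validate_repo_name; infer_instance

-- ===== CLAIM (what is proved, stated in full; the proofs are below) =====
def Claim_equal_validate_repo_name : Prop := ∀ (repo : String), Dom_validate_repo_name repo → Spec_validate_repo_name repo (validate_repo_name repo)

-- ===== LEMMAS AND PROOFS =====

-- Reference split on '/' with an accumulator of the current piece (reversed).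
def splitSlash : List Char → List Char → List (List Char)
  | [], cur => [cur.reverse]
  | c :: rest, cur =>
      if c = '/' then cur.reverse :: splitSlash rest []
      else splitSlash rest (c :: cur)

theorem splitOn_go_slash (l : List Char) :
    ∀ (fuel : Nat) (cur : List Char) (acc : List (List Char)), l.length ≤ fuel →
      PySem.Chars.splitOn.go ['/'] fuel l cur acc = acc.reverse ++ splitSlash l cur := by
  induction l with
  | nil =>
    intro fuel cur acc _
    cases fuel <;> simp [PySem.Chars.splitOn.go, splitSlash]
  | cons c rest ih =>
    intro fuel cur acc hf
    cases fuel with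
    | zero => simp at hf
    | succ f =>
      simp only [List.length_cons, Nat.succ_le_succ_iff] at hf
      by_cases hc : c = '/'
      · subst hc
        rw [show PySem.Chars.splitOn.go ['/'] (f+1) ('/' :: rest) cur acc
              = PySem.Chars.splitOn.go ['/'] f rest [] (cur.reverse :: acc) by
            simp [PySem.Chars.splitOn.go, List.isPrefixOf]]
        rw [ih f [] (cur.reverse :: acc) hf]
        simp only [splitSlash]
        simp
      · rw [show PySem.Chars.splitOn.go ['/'] (f+1) (c :: rest) cur acc
              = PySem.Chars.splitOn.go ['/'] f rest (c :: cur) acc by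
            have hc' : ¬ '/' = c := Ne.symm hc
            simp [PySem.Chars.splitOn.go, List.isPrefixOf, hc']]
        rw [ih f (c :: cur) acc hf]
        simp only [splitSlash, if_neg hc]

theorem splitOn_slash (r : List Char) :
    PySem.Chars.splitOn r ['/'] = splitSlash r [] := by
  rw [PySem.Chars.splitOn, splitOn_go_slash r (r.length + 1) [] [] (by omega)]
  simp

theorem splitSlash_no (b : List Char) (cur : List Char) (h : '/' ∉ b) :
    splitSlash b cur = [cur.reverse ++ b] := by
  induction b generalizing cur with
  | nil => simp [splitSlash]
  | cons c rest ih =>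
    rw [List.mem_cons, not_or] at h
    simp only [splitSlash, if_neg (Ne.symm h.1)]
    rw [ih _ h.2]
    simp

theorem splitSlash_length_pos (l : List Char) (cur : List Char) :
    0 < (splitSlash l cur).length := by
  induction l generalizing cur with
  | nil => simp [splitSlash]
  | cons c rest ih =>
    simp only [splitSlash]
    split
    · simp
    · exact ih _

theorem splitSlash_len_ge (b : List Char) (cur : List Char) (h : '/' ∈ b) :
    2 ≤ (splitSlash b cur).length := by
  induction b generalizing cur with
  | nil => simp at h
  | cons c rest ih =>
    by_cases hc : c = '/'
    · subst hc
      rw [show splitSlash ('/' :: rest) cur = cur.reverse :: splitSlash rest [] from by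
        simp [splitSlash]]
      have := splitSlash_length_pos rest []
      simp only [List.length_cons]
      omega
    · rw [List.mem_cons] at h
      have h' : '/' ∈ rest := by
        rcases h with h | h
        · exact absurd h.symm hc
        · exact h
      simp only [splitSlash, if_neg hc]
      exact ih _ h'

theorem splitSlash_skip (a : List Char) (l cur : List Char) (h : '/' ∉ a) :
    splitSlash (a ++ l) cur = splitSlash l (a.reverse ++ cur) := by
  induction a generalizing cur with
  | nil => simp
  | cons c rest ih =>
    rw [List.mem_cons, not_or] at h
    simp only [List.cons_append, splitSlash, if_neg (Ne.symm h.1)]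
    rw [ih _ h.2]
    simp

theorem first_slash_split {r : List Char} (h : '/' ∈ r) :
    ∃ a b, r = a ++ '/' :: b ∧ '/' ∉ a := by
  induction r with
  | nil => simp at h
  | cons c t ih =>
    by_cases hc : c = '/'
    · exact ⟨[], t, by simp [hc], by simp⟩
    · rw [List.mem_cons] at h
      obtain ⟨a, b, h1, h2⟩ := ih (by
        rcases h with h | h
        · exact absurd h.symm hc
        · exact h)
      refine ⟨c :: a, b, by simp [h1], ?_⟩
      rw [List.mem_cons, not_or]
      exact ⟨Ne.symm hc, h2⟩

theorem isIn_singleton (c : Char) (l : List Char) :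
    PySem.Chars.isIn [c] l = l.contains c := by
  by_cases h : c ∈ l
  · rw [(PySem.Chars.isIn_iff_infix _ _).mpr ((List.singleton_infix_iff _ _).mpr h)]
    simp [h]
  · rw [(PySem.Chars.isIn_eq_false_iff _ _).mpr (fun hi => h ((List.singleton_infix_iff _ _).mp hi))]
    simp [h]

-- A's invalid test on r = a ++ '/' :: b splits into the two segments ('/' is not invalid).
theorem inv_split (a b : List Char) :
    (invList.any (fun ch => (a ++ '/' :: b).contains ch))
      = (a.any (fun c => invList.contains c) || b.any (fun c => invList.contains c)) := by
  rw [Bool.eq_iff_iff]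
  simp only [List.any_eq_true, Bool.or_eq_true, List.contains_eq_mem, decide_eq_true_eq,
    List.mem_append, List.mem_cons]
  constructor
  · rintro ⟨x, hx, (h | h | h)⟩
    · exact Or.inl ⟨x, h, hx⟩
    · subst h; simp [invList] at hx
    · exact Or.inr ⟨x, h, hx⟩
  · rintro (⟨x, hx, hin⟩ | ⟨x, hx, hin⟩)
    · exact ⟨x, hin, Or.inl hx⟩
    · exact ⟨x, hin, Or.inr (Or.inr hx)⟩

-- B's loop on a slash-free list with slashes = 0 ends false.
theorem vrnLoop_noslash_zero (r : List Char) (l0 l1 : Nat) (h : '/' ∉ r) :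
    vrnLoop r 0 l0 l1 = false := by
  induction r generalizing l0 with
  | nil => simp [vrnLoop]
  | cons c rest ih =>
    rw [List.mem_cons, not_or] at h
    by_cases hc : c ∈ invList
    · simp [vrnLoop, hc]
    · simp only [vrnLoop]
      rw [if_neg (show ¬ invList.contains c = true by simp [hc]), if_neg (Ne.symm h.1),
        if_pos trivial]
      exact ih _ h.2

-- B's loop over a slash-free prefix with slashes = 0: consume it into l0, or die on an invalid char.
theorem vrnLoop_skip (a l : List Char) (l0 l1 : Nat) (h : '/' ∉ a) :
    vrnLoop (a ++ l) 0 l0 l1 =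
      if a.any (fun c => invList.contains c) then false else vrnLoop l 0 (l0 + a.length) l1 := by
  induction a generalizing l0 with
  | nil => simp
  | cons c rest ih =>
    rw [List.mem_cons, not_or] at h
    by_cases hc : c ∈ invList
    · simp [vrnLoop, hc]
    · simp only [List.cons_append, vrnLoop]
      rw [if_neg (show ¬ invList.contains c = true by simp [hc]), if_neg (Ne.symm h.1),
        if_pos trivial, ih _ h.2, List.any_cons,
        show invList.contains c = false from by simp [hc], Bool.false_or, List.length_cons,
        show l0 + 1 + rest.length = l0 + (rest.length + 1) from by omega]

-- B's loop after the slash (slashes = 1): false iff a second slash or an invalid char remains.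
theorem vrnLoop_one (b : List Char) (l0 l1 : Nat) :
    vrnLoop b 1 l0 l1 =
      if (b.any (fun c => invList.contains c) || b.contains '/') then false
      else decide (1 ≤ l0 ∧ l0 ≤ 39 ∧ 1 ≤ l1 + b.length ∧ l1 + b.length ≤ 100) := by
  induction b generalizing l1 with
  | nil => simp [vrnLoop]
  | cons c rest ih =>
    by_cases hc : c ∈ invList
    · simp [vrnLoop, hc]
    · by_cases hs : c = '/'
      · subst hs
        simp [vrnLoop, hc]
      · simp only [vrnLoop]
        rw [if_neg (show ¬ invList.contains c = true by simp [hc]), if_neg hs,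
          if_neg (by omega : ¬ (1 : Nat) = 0), ih, List.any_cons,
          show invList.contains c = false from by simp [hc], Bool.false_or,
          List.contains_cons, show ('/' == c) = false by simpa using Ne.symm hs,
          Bool.false_or, List.length_cons,
          show l1 + 1 + rest.length = l1 + (rest.length + 1) from by omega]

theorem core_eq (r : List Char) :
    validate_repo_name_core r = vrnLoop r 0 0 0 := by
  by_cases hin : ('/' : Char) ∈ r
  · obtain ⟨a, b, rfl, ha⟩ := first_slash_split hin
    have hIn : PySem.Chars.isIn ['/'] (a ++ '/' :: b) = true :=
      (PySem.Chars.isIn_iff_infix _ _).mpr ((List.singleton_infix_iff _ _).mpr hin)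
    have hsplit : PySem.Chars.splitOn (a ++ '/' :: b) ['/'] = a :: splitSlash b [] := by
      rw [splitOn_slash, splitSlash_skip a ('/' :: b) [] ha]
      simp only [splitSlash]
      simp
    -- B side
    rw [vrnLoop_skip a ('/' :: b) 0 0 ha]
    simp only [Nat.zero_add]
    have hstep : vrnLoop ('/' :: b) 0 a.length 0 = vrnLoop b 1 a.length 0 := by
      simp only [vrnLoop]
      rw [if_pos trivial, if_neg (by omega : ¬ 0 + 1 > 1),
        if_neg (by decide : ¬ invList.contains '/' = true)]
    -- A side
    unfold validate_repo_name_core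
    rw [hsplit]
    simp only [hIn, not_true, if_false]
    by_cases hb : ('/' : Char) ∈ b
    · -- second slash: both sides false
      have hlen := splitSlash_len_ge b [] hb
      obtain ⟨x, xs, hx⟩ := List.exists_cons_of_ne_nil
        (show splitSlash b [] ≠ [] by intro he; rw [he] at hlen; simp at hlen)
      obtain ⟨y, ys, hy⟩ := List.exists_cons_of_ne_nil
        (show xs ≠ [] by intro he; rw [hx, he] at hlen; simp at hlen)
      rw [hx, hy, hstep, vrnLoop_one,
        if_pos (show ((b.any fun c => invList.contains c) || b.contains '/') = true by simp [hb])]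
      split
      · rename_i heq
        have hlen2 := congrArg List.length heq
        simp at hlen2
      · split <;> rfl
    · -- exactly one slash
      rw [splitSlash_no b [] hb, hstep, vrnLoop_one]
      simp only [List.reverse_nil, List.nil_append, isIn_singleton]
      rw [show ((['<', '>', '"', '|', '*', '?', ':', '\\'].any
            (fun ch => (a ++ '/' :: b).contains ch)))
          = (invList.any (fun ch => (a ++ '/' :: b).contains ch)) from rfl,
        inv_split a b]
      have hbS : b.contains '/' = false := by simpa using hb
      rw [hbS, Bool.or_false]
      by_cases hainv : a.any (fun c => invList.contains c) = true
      · -- invalid char in the owner part: both sides false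
        rw [hainv, Bool.true_or, if_pos rfl, if_pos rfl]
        by_cases he : a = [] ∨ b = []
        · rw [if_pos he]
        · rw [if_neg he]
      · rw [if_neg hainv, (Bool.not_eq_true _).mp hainv, Bool.false_or]
        by_cases hbinv : b.any (fun c => invList.contains c) = true
        · -- invalid char in the name part: both sides false
          rw [hbinv, if_pos rfl, if_pos rfl]
          by_cases he : a = [] ∨ b = []
          · rw [if_pos he]
          · rw [if_neg he]
        · rw [(Bool.not_eq_true _).mp hbinv]
          simp only [Bool.false_eq_true, if_false]
          by_cases he : a = [] ∨ b = []
          · rw [if_pos he, eq_comm, decide_eq_false_iff_not]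
            have : a.length = 0 ∨ b.length = 0 := by
              rcases he with h | h <;> simp [h]
            omega
          · rw [if_neg he]
            rw [not_or] at he
            have h1 : 0 < a.length := List.length_pos_iff.mpr he.1
            have h2 : 0 < b.length := List.length_pos_iff.mpr he.2
            by_cases hbig : a.length > 39 ∨ b.length > 100
            · rw [if_pos hbig, eq_comm, decide_eq_false_iff_not]
              omega
            · rw [if_neg hbig, eq_comm]
              exact decide_eq_true (by omega)
  · have h1 : PySem.Chars.isIn ['/'] r = false :=
      (PySem.Chars.isIn_eq_false_iff _ _).mpr
        (fun hi => hin ((List.singleton_infix_iff _ _).mp hi))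
    unfold validate_repo_name_core
    rw [h1, vrnLoop_noslash_zero r 0 0 hin]
    simp

-- ===== VERDICT (by name: the statement is the Claim_ definition above) =====
theorem validate_repo_name_spec : Claim_equal_validate_repo_name := by
  intro repo _
  unfold Spec_validate_repo_name validate_repo_name validate_repo_name_alt
  split
  · rfl
  · exact core_eq _
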